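-- pv_equiv track=rewrite | github.com/xgrg/jsvn | python/jsvn/parse.py | split_choice
-- ===== SOURCE A (Python) =====
-- def does_start_by_preamble_key(line, preamble):
--     for each in preamble.keys():
--         if line.lower().startswith(each):
--             return each
--     return False
--
-- def split_choice(v1):
--     lines = [e for e in v1.split('\n')]
--     preamble = {'@if': None}
--     # Splitting preamble
--     split = []
--     i = 0
--     prev = -1
--     curr = 0
--     while i < len(lines):
--         each = lines[i]
--         if each == '':
--             i = i + 1
--             continue
--         k = does_start_by_preamble_key(each, preamble)
--         if not k is False:
--             prev = curr
--             curr = i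
--             if prev != -1:
--                 split.append('\n'.join(lines[prev:curr]))
--         i = i + 1
--     if len(split) == 0 and curr != 0:
--         split.append('\n'.join(lines[:curr]))
--     split.append('\n'.join(lines[curr:i]))
--
--     body = []
--     for each in lines[i:]:
--         body.append(each)
--
--     # Processing split preamble
--     for each in split:
--         if '@if' in each:
--             preamble['@if'] = each.split('@if')[1]
--         #elif '@action' in each:
--         #    preamble['@action'] = each.split('@action')[1]
--         else:
--             d = each
--     return d, preamble
-- ===== SOURCE B (Python) =====
-- def split_choice(v1):
--     lines = v1.split('\n')
--     positions = [i for i, line in enumerate(lines)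
--                  if line != '' and line.lower().startswith('@if')]
--     if positions:
--         segs = ['\n'.join(lines[:positions[0]])]
--         segs += ['\n'.join(lines[a:b]) for a, b in zip(positions, positions[1:])]
--         segs.append('\n'.join(lines[positions[-1]:]))
--     else:
--         segs = ['\n'.join(lines)]
--     ifpart = None
--     for seg in segs:
--         if '@if' in seg:
--             ifpart = seg.split('@if')[1]
--         else:
--             d = seg
--     return d, {'@if': ifpart}
-- ===== Notes on version B (the rewrite author's own statement) =====
-- stated objective: simpler
-- what changed: A's stateful while-loop with prev/curr/i bookkeeping and a dead special-case branch is replaced by computing the key-line positions once with a comprehension and building the segments directly by slicing between consecutive positions; the preamble dict is built at the end instead of mutated.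
import Mathlib
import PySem

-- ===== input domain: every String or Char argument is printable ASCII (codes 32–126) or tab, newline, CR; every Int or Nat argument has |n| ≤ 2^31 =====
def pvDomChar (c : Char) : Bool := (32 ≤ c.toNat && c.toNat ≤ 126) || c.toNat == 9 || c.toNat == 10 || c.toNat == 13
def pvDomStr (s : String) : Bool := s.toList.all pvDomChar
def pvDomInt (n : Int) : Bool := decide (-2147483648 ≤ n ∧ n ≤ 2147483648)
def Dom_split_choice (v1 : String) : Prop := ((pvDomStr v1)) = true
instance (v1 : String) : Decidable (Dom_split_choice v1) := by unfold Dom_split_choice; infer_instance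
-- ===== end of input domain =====

-- B replaces A's stateful while-loop (prev/curr bookkeeping) by computing the key-line
-- positions once and slicing the segments directly; objective: simpler.

-- ===== PORT A =====
def does_start_by_preamble_key (line : String) (preamble : PySem.Dict String (Option String)) : Option String :=
  preamble.keys.findSome? (fun each =>
    if PySem.Str.startswith (PySem.Str.lower line) each then some each else none)

def pvPreamble0 : PySem.Dict String (Option String) := PySem.Dict.mk [("@if", none)]

-- body of A's while loop (one step, i advancing by 1 each iteration); state (prev, curr, split)
def pvA_scan (lines : List String) (st : Int × Int × List String) (p : Int × String) :
    Int × Int × List String :=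
  let (prev, curr, split) := st
  if p.2 == "" then (prev, curr, split)
  else
    match does_start_by_preamble_key p.2 pvPreamble0 with
    | none => (prev, curr, split)
    | some _ =>
      let prev := curr
      let curr := p.1
      if prev ≠ -1 then
        (prev, curr, split ++ [PySem.Str.join "\n" (PySem.List.slice lines (some prev) (some curr))])
      else (prev, curr, split)

-- body of A's classification loop; state (preamble, d); d = none models "d not yet assigned"
def pvA_class (st : PySem.Dict String (Option String) × Option String) (each : String) :
    PySem.Dict String (Option String) × Option String :=
  if PySem.Str.isIn "@if" each then
    (st.1.insert "@if" (some (PySem.List.pyGetD ((PySem.Str.split? each "@if").getD []) 1 "")), st.2)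
  else (st.1, some each)

def split_choice (v1 : String) : String × (List (String × Option String)) :=
  let lines := (PySem.Str.split? v1 "\n").getD []
  let st := (PySem.List.enumerate lines 0).foldl (pvA_scan lines) (-1, 0, [])
  let curr := st.2.1
  let split := st.2.2
  let i : Int := (lines.length : Int)     -- value of i after the while loop
  let split := if split = [] ∧ curr ≠ 0 then
      split ++ [PySem.Str.join "\n" (PySem.List.slice lines none (some curr))]
    else split
  let split := split ++ [PySem.Str.join "\n" (PySem.List.slice lines (some curr) (some i))]
  let _body := (PySem.List.slice lines (some i) none).foldl (fun b e => b ++ [e]) ([] : List String)  -- always []; unused, as in A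
  let r := split.foldl pvA_class (pvPreamble0, none)
  ((r.2).getD "", r.1.items)   -- r.2 = none (d unbound, UnboundLocalError) is excluded by Pre_

-- ===== PORT B =====
-- body of B's classification loop; state (ifpart, d)
def pvB_class (st : Option String × Option String) (seg : String) :
    Option String × Option String :=
  if PySem.Str.isIn "@if" seg then
    (some (PySem.List.pyGetD ((PySem.Str.split? seg "@if").getD []) 1 ""), st.2)
  else (st.1, some seg)

def split_choice_alt (v1 : String) : String × (List (String × Option String)) :=
  let lines := (PySem.Str.split? v1 "\n").getD []
  let positions := ((PySem.List.enumerate lines 0).filter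
      (fun p => p.2 != "" && PySem.Str.startswith (PySem.Str.lower p.2) "@if")).map (·.1)
  let segs :=
    match positions with
    | [] => [PySem.Str.join "\n" lines]
    | p0 :: _ =>
      [PySem.Str.join "\n" (PySem.List.slice lines none (some p0))]
      ++ (positions.zip (PySem.List.slice positions (some 1) none)).map
          (fun (ab : Int × Int) => PySem.Str.join "\n" (PySem.List.slice lines (some ab.1) (some ab.2)))
      ++ [PySem.Str.join "\n"
          (PySem.List.slice lines (some (PySem.List.pyGetD positions (-1) 0)) none)]
  let r := segs.foldl pvB_class (none, none)
  ((r.2).getD "", [("@if", r.1)])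

-- ===== PRECONDITION & SPEC =====
-- Pre_ excludes exactly the inputs on which A raises UnboundLocalError (every segment of the
-- split contains '@if', so d is never assigned); B raises there too.
def pvKeyLine (l : String) : Bool := l != "" && PySem.Str.startswith (PySem.Str.lower l) "@if"

def pvChunksOf (lines : List String) : List Nat → List (List String)
  | [] => []
  | [a] => [lines.drop a]
  | a :: b :: rest => ((lines.drop a).take (b - a)) :: pvChunksOf lines (b :: rest)

def pvBlocksOf (lines : List String) : List (List String) :=
  match (List.range lines.length).filter (fun i => pvKeyLine (lines.getD i "")) with
  | [] => [lines]
  | p :: ps => lines.take p :: pvChunksOf lines (p :: ps)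

def Pre_split_choice (v1 : String) : Prop :=
  (pvBlocksOf ((PySem.Str.split? v1 "\n").getD [])).any
    (fun blk => blk.all (fun l => !(PySem.Str.isIn "@if" l))) = true
instance (v1 : String) : Decidable (Pre_split_choice v1) := by unfold Pre_split_choice; infer_instance

def pvWitness_split_choice : String := "a"

def Spec_split_choice (v1 : String) (out : String × (List (String × Option String))) : Prop := out = split_choice_alt v1
instance (v1 : String) (out : String × (List (String × Option String))) : Decidable (Spec_split_choice v1 out) := by unfold Spec_split_choice; infer_instance

-- ===== CLAIM (what is proved, stated in full; the proofs are below) =====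
def Claim_equal_split_choice : Prop := ∀ (v1 : String), Dom_split_choice v1 → Pre_split_choice v1 → Spec_split_choice v1 (split_choice v1)

-- ===== LEMMAS AND PROOFS =====

-- proof-side descriptions of the two programs' shared structure
def pvPos (xs : List String) (s : Int) : List Int :=
  ((PySem.List.enumerate xs s).filter
    (fun p => p.2 != "" && PySem.Str.startswith (PySem.Str.lower p.2) "@if")).map (·.1)

def pvSeg (L : List String) (a b : Int) : String :=
  PySem.Str.join "\n" (PySem.List.slice L (some a) (some b))

def pvAccA (L : List String) (prev curr : Int) : List Int → Int × Int × List String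
  | [] => (prev, curr, [])
  | q :: qs =>
    let r := pvAccA L curr q qs
    (r.1, r.2.1, pvSeg L curr q :: r.2.2)

theorem pv_dsbpk_eq (l : String) : does_start_by_preamble_key l pvPreamble0 =
    if PySem.Str.startswith (PySem.Str.lower l) "@if" = true then some "@if" else none := by
  simp [does_start_by_preamble_key, pvPreamble0, PySem.Dict.keys]

theorem pv_scan_eq (L : List String) : ∀ (xs : List String) (s prev curr : Int) (split : List String),
    0 ≤ s → 0 ≤ curr →
    (PySem.List.enumerate xs s).foldl (pvA_scan L) (prev, curr, split) =
      ((pvAccA L prev curr (pvPos xs s)).1, (pvAccA L prev curr (pvPos xs s)).2.1,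
        split ++ (pvAccA L prev curr (pvPos xs s)).2.2) := by
  intro xs
  induction xs with
  | nil => intro s prev curr split hs hc; simp [PySem.List.enumerate, pvPos, pvAccA]
  | cons x xs ih =>
    intro s prev curr split hs hc
    rw [PySem.List.enumerate_cons]
    by_cases hk : (x != "" && PySem.Str.startswith (PySem.Str.lower x) "@if") = true
    · have hx : (x == "") = false := by
        rcases Bool.and_eq_true .. |>.mp hk with ⟨h1, _⟩
        simpa using h1
      have hxne : ¬ x = "" := by simpa using hx
      have hsw : PySem.Str.startswith (PySem.Str.lower x) "@if" = true :=
        (Bool.and_eq_true .. |>.mp hk).2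
      have hsw2 : PySem.Chars.startswith (PySem.Chars.lower x.toList) ['@', 'i', 'f'] = true := by
        simpa using hsw
      have hne : curr ≠ -1 := by omega
      have hstep : pvA_scan L (prev, curr, split) (s, x) =
          (curr, s, split ++ [pvSeg L curr s]) := by
        simp [pvA_scan, hx, pv_dsbpk_eq, hsw2, hne, pvSeg]
      have hpos : pvPos (x :: xs) s = s :: pvPos xs (s + 1) := by
        simp [pvPos, PySem.List.enumerate_cons, hxne, hsw2]
      rw [List.foldl_cons, hstep, ih (s + 1) curr s _ (by omega) hs, hpos]
      simp [pvAccA]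
    · have hstep2 : ¬ (¬ x = "" ∧
          PySem.Chars.startswith (PySem.Chars.lower x.toList) ['@', 'i', 'f'] = true) := by
        intro ⟨h1, h2⟩
        exact hk (by simp [h1, h2])
      have hstep : pvA_scan L (prev, curr, split) (s, x) = (prev, curr, split) := by
        by_cases hx : (x == "") = true
        · simp [pvA_scan, hx]
        · have hx' : ¬ x = "" := by simpa using hx
          have hsw : PySem.Chars.startswith (PySem.Chars.lower x.toList) ['@', 'i', 'f'] = false := by
            cases hsw : PySem.Chars.startswith (PySem.Chars.lower x.toList) ['@', 'i', 'f'] with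
            | false => rfl
            | true => exact absurd ⟨hx', hsw⟩ hstep2
          simp [pvA_scan, hx, pv_dsbpk_eq, hsw]
      have hpos : pvPos (x :: xs) s = pvPos xs (s + 1) := by
        simp [pvPos, PySem.List.enumerate_cons, hstep2]
      rw [List.foldl_cons, hstep, hpos, ih (s + 1) prev curr split (by omega) hc]

theorem pv_pos_nonneg (xs : List String) (s : Int) (hs : 0 ≤ s) :
    ∀ q ∈ pvPos xs s, 0 ≤ q := by
  intro q hq
  unfold pvPos at hq
  rcases List.mem_map.1 hq with ⟨p, hp, rfl⟩
  have hpe : p ∈ PySem.List.enumerate xs s := List.mem_of_mem_filter hp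
  have hp1 : p.1 ∈ (PySem.List.enumerate xs s).map (fun x => x.1) :=
    List.mem_map_of_mem hpe
  rw [PySem.List.map_fst_enumerate] at hp1
  have := PySem.List.mem_pyRange_one.1 hp1
  omega

theorem pv_accA_segs (L : List String) : ∀ (qs : List Int) (p c : Int),
    (pvAccA L p c qs).2.2 = ((c :: qs).zip qs).map (fun ab => pvSeg L ab.1 ab.2) := by
  intro qs
  induction qs with
  | nil => intro p c; simp [pvAccA]
  | cons q qs ih => intro p c; simp [pvAccA, ih c q]

theorem pv_accA_curr (L : List String) : ∀ (qs : List Int) (p c : Int),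
    (pvAccA L p c qs).2.1 = qs.getLast?.getD c := by
  intro qs
  induction qs with
  | nil => intro p c; simp [pvAccA]
  | cons q qs ih =>
    intro p c
    have : (q :: qs).getLast?.getD c = qs.getLast?.getD q := by
      cases qs <;> simp [List.getLast?_cons]
    rw [this]
    simp [pvAccA, ih c q]

theorem pv_insert_if (x v : Option String) :
    (PySem.Dict.mk [("@if", x)]).insert "@if" v = PySem.Dict.mk [("@if", v)] := rfl

theorem pv_classify_eq : ∀ (segs : List String) (x d : Option String),
    segs.foldl pvA_class (PySem.Dict.mk [("@if", x)], d) =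
      (PySem.Dict.mk [("@if", (segs.foldl pvB_class (x, d)).1)],
        (segs.foldl pvB_class (x, d)).2) := by
  intro segs
  induction segs with
  | nil => intro x d; simp
  | cons sgm segs ih =>
    intro x d
    by_cases h : PySem.Str.isIn "@if" sgm = true
    · simp only [List.foldl_cons, pvA_class, pvB_class, h, if_pos, pv_insert_if]
      exact ih _ _
    · have h' : PySem.Str.isIn "@if" sgm = false := by simpa using h
      simp only [List.foldl_cons, pvA_class, pvB_class, h', Bool.false_eq_true, if_false]
      exact ih _ _

theorem pv_slice_to_len (L : List String) (q : Int) (hq : 0 ≤ q) :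
    PySem.List.slice L (some q) (some (L.length : Int)) = PySem.List.slice L (some q) none := by
  rw [PySem.List.slice_toNat L hq (by positivity), PySem.List.slice_from L hq]
  exact List.take_of_length_le (by simp)

theorem split_choice_total_eq : ∀ (v1 : String), split_choice v1 = split_choice_alt v1 := by
  intro v1
  unfold split_choice split_choice_alt
  simp only []
  set L := (PySem.Str.split? v1 "\n").getD [] with hL
  rw [pv_scan_eq L L 0 (-1) 0 [] le_rfl le_rfl]
  have hposdef : ((PySem.List.enumerate L 0).filter
      (fun p => p.2 != "" && PySem.Str.startswith (PySem.Str.lower p.2) "@if")).map (·.1)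
      = pvPos L 0 := rfl
  rw [hposdef]
  rcases hps : pvPos L 0 with _ | ⟨p0, qs⟩
  · -- no key lines
    rw [pvAccA]
    simp only [List.nil_append, List.append_nil]
    have hfull : PySem.List.slice L (some (0:Int)) (some (L.length:Int)) = L := by
      rw [PySem.List.slice_zero_start, PySem.List.slice_to L (by positivity)]
      simp
    simp only [ne_eq, not_true_eq_false, and_false, if_false, hfull]
    rw [show pvPreamble0 = PySem.Dict.mk [("@if", none)] from rfl, pv_classify_eq]
    simp
  · -- at least one key line
    have hnn : ∀ q ∈ p0 :: qs, 0 ≤ q := by rw [← hps]; exact pv_pos_nonneg L 0 le_rfl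
    rw [pv_accA_curr, pv_accA_segs]
    have hlast : (p0 :: qs).getLast?.getD 0 = (p0 :: qs).getLast (by simp) := by
      rw [List.getLast?_eq_some_getLast (by simp)]; rfl
    have h0le : (0:Int) ≤ (p0 :: qs).getLast (by simp) :=
      hnn _ (List.getLast_mem _)
    -- the just-built split list is nonempty, so A's dead branch is skipped
    have hzip : ((0 : Int) :: p0 :: qs).zip (p0 :: qs) = (0, p0) :: (p0 :: qs).zip qs := by
      simp
    rw [hzip]
    simp only [List.map_cons, List.nil_append, reduceCtorEq, false_and, if_false]
    rw [hlast, pv_slice_to_len L _ h0le]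
    have htail : PySem.List.slice (p0 :: qs) (some (1:Int)) none = qs :=
      PySem.List.slice_from_one (p0 :: qs)
    have hgetlast : PySem.List.pyGetD (p0 :: qs) (-1) 0 = (p0 :: qs).getLast (by simp) :=
      PySem.List.pyGetD_neg_one _ 0 (by simp)
    rw [htail, hgetlast]
    have hhead : pvSeg L 0 p0 = PySem.Str.join "\n" (PySem.List.slice L none (some p0)) := by
      rw [pvSeg, PySem.List.slice_zero_start]
    rw [hhead]
    rw [show pvPreamble0 = PySem.Dict.mk [("@if", none)] from rfl]
    simp only [pvSeg]
    rw [pv_classify_eq]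
    simp

-- ===== VERDICT (by name: the statement is the Claim_ definition above) =====
theorem split_choice_spec : Claim_equal_split_choice := by
  intro v1 _ _
  unfold Spec_split_choice
  exact split_choice_total_eq v1
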